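-- pv_equiv track=rewrite | github.com/Aufrichtig98/BachelorThesisEvaluation | ResultBlackbox/GroundTruthBlackBox.py | feature_permutation
-- ===== SOURCE A (Python) =====
-- from typing import List, Dict
--
-- def feature_permutation(feature_list: List[str], legal:List[List[str]]) -> List[List[str]]:
--     num_sets = 1 << len(feature_list)
--     feature_permutation = []
--     for current_mask in range(num_sets):
--
--         string_list = []
--         for i in range(len(feature_list)):
--             if (current_mask & (1 << i)) != 0:
--                 string_list.append(feature_list[i])
--         feature_permutation.append(string_list)
--
--     for configuration in feature_permutation:
--         for term in legal:
--             if all([item] in configuration for item in term):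
--                 configuration.append(["".join(term)])
--
--     return feature_permutation
-- ===== SOURCE B (Python) =====
-- def feature_permutation(feature_list, legal):
--     # iterative power-set doubling instead of bitmask enumeration; same order
--     feature_permutation = [[]]
--     for f in feature_list:
--         feature_permutation = feature_permutation + [subset + [f] for subset in feature_permutation]
--
--     for configuration in feature_permutation:
--         for term in legal:
--             if all([item] in configuration for item in term):
--                 configuration.append(["".join(term)])
--
--     return feature_permutation
-- ===== Notes on version B (the rewrite author's own statement) =====
-- stated objective: idiomatic
-- what changed: B builds the power set by iterative doubling (result = result + [s + [f] for s in result]) instead of enumerating bitmasks 0..2^n-1 and testing each bit; the tagging loop over legal is kept verbatim, so B matches A everywhere it returns.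
-- outside the precondition, e.g. on feature_permutation(['a'], [[]]): A returns [[['']], ['a', ['']]], B returns [[['']], ['a', ['']]]
import Mathlib
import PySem

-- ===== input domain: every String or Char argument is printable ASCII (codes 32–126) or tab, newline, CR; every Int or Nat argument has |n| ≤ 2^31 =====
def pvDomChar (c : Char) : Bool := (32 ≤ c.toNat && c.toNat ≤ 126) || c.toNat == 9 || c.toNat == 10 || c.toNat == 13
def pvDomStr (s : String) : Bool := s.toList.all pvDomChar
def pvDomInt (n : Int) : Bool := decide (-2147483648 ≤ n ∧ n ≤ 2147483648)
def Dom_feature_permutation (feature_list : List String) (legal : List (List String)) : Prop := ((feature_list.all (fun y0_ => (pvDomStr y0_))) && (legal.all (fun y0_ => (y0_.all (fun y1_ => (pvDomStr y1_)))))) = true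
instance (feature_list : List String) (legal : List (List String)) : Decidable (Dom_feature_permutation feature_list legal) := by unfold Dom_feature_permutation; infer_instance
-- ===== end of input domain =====

-- B replaces the bitmask enumeration of all subsets by iterative power-set doubling
-- (result = result + [s + [f] for s in result]); same output order, objective: idiomatic/alternative.

-- ===== PORT A =====
-- the second Python loop, shared verbatim by both ports (it is identical in Source A and Source B):
-- 'for configuration in perms: for term in legal: if all([item] in configuration for item in term): configuration.append(["".join(term)])'.
-- In Python '[item] in configuration' compares a one-element LIST with the strings of configuration, hence is
-- always False while configuration holds only strings; so 'all' holds exactly for an empty term, and the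
-- appended element ["".join(term)] is a nested list that leaves the declared type List[List[str]].
-- Pre_ excludes empty terms, so on the claimed domain this branch never fires; the appended value is ported
-- as the joined string (a placeholder that is never reached under Pre_).
def pyTagLegal (legal : List (List String)) (perms : List (List String)) : List (List String) :=
  perms.map (fun configuration =>
    legal.foldl (fun configuration term =>
      if term.all (fun _ => false) then configuration ++ [PySem.Str.join "" term]
      else configuration)
      configuration)

-- inner loop of A: 'for i in range(len(feature_list)): if current_mask & (1 << i) != 0: string_list.append(feature_list[i])'
-- (feature_list[i] with 0 ≤ i < len is ported as getD; the index is always in range)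
def maskSub (feature_list : List String) (current_mask : Nat) : List String :=
  (List.range feature_list.length).foldl
    (fun string_list i =>
      if current_mask &&& (1 <<< i) ≠ 0 then string_list ++ [feature_list.getD i ""]
      else string_list)
    []

-- masks run over range(num_sets) with num_sets = 1 << len ≥ 0; ported with Nat masks (exact: all values nonnegative)
def feature_permutation (feature_list : List String) (legal : List (List String)) : List (List String) :=
  let num_sets := 1 <<< feature_list.length
  pyTagLegal legal
    ((List.range num_sets).foldl
      (fun acc current_mask => acc ++ [maskSub feature_list current_mask]) [])

-- ===== PORT B =====
def feature_permutation_alt (feature_list : List String) (legal : List (List String)) : List (List String) :=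
  pyTagLegal legal
    (feature_list.foldl
      (fun result f => result ++ result.map (fun subset => subset ++ [f])) [[]])

-- ===== PRECONDITION & SPEC =====
-- Pre_ excludes legal lists containing an empty term: there A returns a value containing the nested
-- list [''] inside a configuration, which is not a value of the declared type List[List[str]].
def Pre_feature_permutation (feature_list : List String) (legal : List (List String)) : Prop :=
  legal.all (fun term => !term.isEmpty) = true
instance (feature_list : List String) (legal : List (List String)) : Decidable (Pre_feature_permutation feature_list legal) := by unfold Pre_feature_permutation; infer_instance

def pvWitness_feature_permutation : List String × List (List String) :=
  (["a", "b"], [["a"], ["b", "c"]])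

def Spec_feature_permutation (feature_list : List String) (legal : List (List String)) (out : List (List String)) : Prop := out = feature_permutation_alt feature_list legal
instance (feature_list : List String) (legal : List (List String)) (out : List (List String)) : Decidable (Spec_feature_permutation feature_list legal out) := by unfold Spec_feature_permutation; infer_instance

-- ===== CLAIM (what is proved, stated in full; the proofs are below) =====
def Claim_equal_feature_permutation : Prop := ∀ (feature_list : List String) (legal : List (List String)), Dom_feature_permutation feature_list legal → Pre_feature_permutation feature_list legal → Spec_feature_permutation feature_list legal (feature_permutation feature_list legal)

-- ===== LEMMAS AND PROOFS =====

-- the membership/bit test: mask & (1 << i) != 0  ↔  testBit mask i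
theorem bitcond_iff (m i : Nat) : (m &&& (1 <<< i) ≠ 0) ↔ m.testBit i = true := by
  rw [Nat.one_shiftLeft, Nat.and_two_pow]
  cases h : m.testBit i <;> simp

theorem maskSub_append (fs : List String) (f : String) (m : Nat) :
    maskSub (fs ++ [f]) m =
      (if m.testBit fs.length then maskSub fs m ++ [f] else maskSub fs m) := by
  unfold maskSub
  rw [List.length_append, List.length_cons, List.length_nil, List.range_succ,
    List.foldl_append]
  have hcongr :
      (List.range fs.length).foldl
        (fun string_list i =>
          if m &&& (1 <<< i) ≠ 0 then string_list ++ [(fs ++ [f]).getD i ""] else string_list) [] =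
      (List.range fs.length).foldl
        (fun string_list i =>
          if m &&& (1 <<< i) ≠ 0 then string_list ++ [fs.getD i ""] else string_list) [] := by
    apply PySem.List.foldl_congr_mem
    intro acc i hi
    have hlt : i < fs.length := List.mem_range.mp hi
    have : (fs ++ [f]).getD i "" = fs.getD i "" := by
      simp [List.getD, List.getElem?_append_left hlt]
    rw [this]
  rw [hcongr]
  have hget : (fs ++ [f]).getD fs.length "" = f := by
    simp [List.getD]
  simp only [List.foldl_cons, List.foldl_nil, hget]
  by_cases hb : m.testBit fs.length = true
  · rw [if_pos ((bitcond_iff m fs.length).mpr hb), if_pos hb]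
  · rw [if_neg (fun h => hb ((bitcond_iff m fs.length).mp h)), if_neg hb]

-- masks below 2^n have no bits the tail features would read differently
theorem maskSub_congr_lowbits (fs : List String) (m m' : Nat)
    (h : ∀ i, i < fs.length → m.testBit i = m'.testBit i) :
    maskSub fs m = maskSub fs m' := by
  unfold maskSub
  apply PySem.List.foldl_congr_mem
  intro acc i hi
  have hlt : i < fs.length := List.mem_range.mp hi
  by_cases hb : m'.testBit i = true
  · rw [if_pos ((bitcond_iff m i).mpr ((h i hlt).trans hb)),
      if_pos ((bitcond_iff m' i).mpr hb)]
  · rw [if_neg (fun hc => hb ((h i hlt).symm.trans ((bitcond_iff m i).mp hc))),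
      if_neg (fun hc => hb ((bitcond_iff m' i).mp hc))]

-- the key order lemma: the bitmask enumeration equals iterative power-set doubling
theorem range_maskSub_eq (fs : List String) :
    (List.range (2 ^ fs.length)).map (maskSub fs) =
      fs.foldl (fun result f => result ++ result.map (fun subset => subset ++ [f])) [[]] := by
  induction fs using List.reverseRecOn with
  | nil => simp [maskSub]
  | append_singleton fs f ih =>
    rw [List.foldl_append, List.foldl_cons, List.foldl_nil, ← ih]
    have hlen : (fs ++ [f]).length = fs.length + 1 := by simp
    rw [hlen, pow_succ, mul_two, List.range_add, List.map_append, List.map_map, List.map_map]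
    congr 1
    · apply List.map_congr_left
      intro m hm
      have hmlt : m < 2 ^ fs.length := List.mem_range.mp hm
      rw [maskSub_append]
      rw [if_neg (by simp [Nat.testBit_lt_two_pow hmlt])]
    · apply List.map_congr_left
      intro m hm
      have hmlt : m < 2 ^ fs.length := List.mem_range.mp hm
      show maskSub (fs ++ [f]) (2 ^ fs.length + m) = maskSub fs m ++ [f]
      rw [maskSub_append]
      rw [if_pos (by
        rw [Nat.testBit_two_pow_add_eq, Nat.testBit_lt_two_pow hmlt]; rfl)]
      congr 1
      apply maskSub_congr_lowbits
      intro i hilt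
      exact Nat.testBit_two_pow_add_gt hilt m

-- ===== VERDICT (by name: the statement is the Claim_ definition above) =====
theorem feature_permutation_spec : Claim_equal_feature_permutation := by
  intro feature_list legal _ _
  show feature_permutation feature_list legal = feature_permutation_alt feature_list legal
  unfold feature_permutation feature_permutation_alt
  show pyTagLegal legal
      ((List.range (1 <<< feature_list.length)).foldl
        (fun acc current_mask => acc ++ [maskSub feature_list current_mask]) []) = _
  congr 1
  rw [PySem.List.foldl_append_singleton_eq_map, List.nil_append, Nat.one_shiftLeft]
  exact range_maskSub_eq feature_list
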